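-- pv_equiv track=rewrite | github.com/hossein-rezaei624/pytorch-cifar | ca.py | distribute_excess
-- ===== SOURCE A (Python) =====
-- def distribute_excess(lst, check_bound):
--     # Calculate the total excess value
--     total_excess = sum(val - check_bound for val in lst if val > check_bound)
--
--     # Number of elements that are not greater than check_bound
--     recipients = [i for i, val in enumerate(lst) if val < check_bound]
--
--     num_recipients = len(recipients)
--
--     # Calculate the average share and remainder
--     avg_share, remainder = divmod(total_excess, num_recipients)
--
--     lst = [val if val <= check_bound else check_bound for val in lst]
--
--     # Distribute the average share
--     for idx in recipients:
--         lst[idx] += avg_share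
--
--     # Distribute the remainder
--     for idx in recipients[:remainder]:
--         lst[idx] += 1
--
--     # Cap values greater than check_bound
--     for i, val in enumerate(lst):
--         if val > check_bound:
--             return distribute_excess(lst, check_bound)
--             break
--
--     return lst
-- ===== SOURCE B (Python) =====
-- def distribute_excess(lst, check_bound):
--     vals = lst
--     while True:
--         total_excess = sum(v - check_bound for v in vals if v > check_bound)
--         num_recipients = sum(1 for v in vals if v < check_bound)
--         avg_share, remainder = divmod(total_excess, num_recipients)
--         out = []
--         seen = 0
--         for v in vals:
--             if v > check_bound:
--                 out.append(check_bound)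
--             elif v < check_bound:
--                 out.append(v + avg_share + (1 if seen < remainder else 0))
--                 seen += 1
--             else:
--                 out.append(v)
--         if any(v > check_bound for v in out):
--             vals = out
--         else:
--             return out
-- ===== Notes on version B (the rewrite author's own statement) =====
-- stated objective: alternative
-- what changed: The tail recursion becomes an explicit while-loop, and each pass is a single traversal that caps, adds the average share and hands out the remainder via a running recipient counter, instead of A's four passes (excess sum, recipient index list, capping map, then two index-based update loops over the recipient list and its slice).
import Mathlib
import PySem

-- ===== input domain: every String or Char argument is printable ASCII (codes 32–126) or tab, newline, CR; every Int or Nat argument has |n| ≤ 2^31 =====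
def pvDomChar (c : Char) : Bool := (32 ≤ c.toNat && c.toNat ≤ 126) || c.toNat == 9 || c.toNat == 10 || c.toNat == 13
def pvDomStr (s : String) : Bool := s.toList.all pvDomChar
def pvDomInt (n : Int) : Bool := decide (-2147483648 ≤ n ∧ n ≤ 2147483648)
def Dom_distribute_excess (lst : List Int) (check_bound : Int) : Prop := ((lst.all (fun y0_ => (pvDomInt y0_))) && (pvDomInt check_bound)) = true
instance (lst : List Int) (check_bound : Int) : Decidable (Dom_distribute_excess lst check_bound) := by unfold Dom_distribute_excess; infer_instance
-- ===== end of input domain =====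

-- B replaces A's tail recursion by a while-loop whose body is a single traversal with a
-- running recipient counter (objective: alternative decomposition, same asymptotic cost).

-- ===== PORT A =====
-- total_excess = sum(val - check_bound for val in lst if val > check_bound)
def excA (lst : List Int) (check_bound : Int) : Int :=
  ((lst.filter (fun val => decide (check_bound < val))).map (fun val => val - check_bound)).sum

-- recipients = [i for i, val in enumerate(lst) if val < check_bound]
def recipsA (lst : List Int) (check_bound : Int) : List Int :=
  ((PySem.List.enumerate lst 0).filter (fun p => decide (p.2 < check_bound))).map Prod.fst

-- one body of A (everything before the final cap-check loop)
def passA (lst : List Int) (check_bound : Int) : List Int :=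
  let total_excess := excA lst check_bound
  let recipients := recipsA lst check_bound
  let num_recipients := recipients.length
  -- divmod: Python raises ZeroDivisionError when num_recipients = 0; Pre_ excludes exactly those runs
  let qr := (PySem.Int.divmod? total_excess (num_recipients : Int)).getD (0, 0)
  let lst1 := lst.map (fun val => if val ≤ check_bound then val else check_bound)
  -- lst[idx] += avg_share : idx comes from enumerate, so 0 ≤ idx < len and += is List.modify
  let lst2 := recipients.foldl (fun l idx => l.modify idx.toNat (· + qr.1)) lst1
  -- recipients[:remainder] : remainder = total_excess mod num_recipients ≥ 0 here, so the slice is take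
  (recipients.take qr.2.toNat).foldl (fun l idx => l.modify idx.toNat (· + 1)) lst2

-- the recursion 'if any val > check_bound: return distribute_excess(lst, ...)' with fuel;
-- each recursive call strictly decreases the total excess, so excA+1 steps always suffice
def goA : Nat → List Int → Int → List Int
  | 0, lst, _ => lst
  | fuel+1, lst, check_bound =>
    let lst3 := passA lst check_bound
    if lst3.any (fun val => decide (check_bound < val)) then goA fuel lst3 check_bound else lst3

def distribute_excess (lst : List Int) (check_bound : Int) : List Int :=
  goA ((excA lst check_bound).toNat + 1) lst check_bound

-- ===== PORT B =====
-- total_excess = sum(v - check_bound for v in vals if v > check_bound), as a running sum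
def excB (vals : List Int) (check_bound : Int) : Int :=
  vals.foldl (fun s v => if check_bound < v then s + (v - check_bound) else s) 0

-- num_recipients = sum(1 for v in vals if v < check_bound)
def cntB (vals : List Int) (check_bound : Int) : Int :=
  vals.foldl (fun c v => if v < check_bound then c + 1 else c) 0

-- the single building pass: cap, add avg_share, +1 while seen < remainder
def buildB (check_bound avg_share remainder : Int) : List Int → Nat → List Int
  | [], _ => []
  | v :: t, seen =>
    if check_bound < v then check_bound :: buildB check_bound avg_share remainder t seen
    else if v < check_bound then
      (v + avg_share + (if (seen : Int) < remainder then 1 else 0))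
        :: buildB check_bound avg_share remainder t (seen + 1)
    else v :: buildB check_bound avg_share remainder t seen

def passB (vals : List Int) (check_bound : Int) : List Int :=
  let total_excess := excB vals check_bound
  let num_recipients := cntB vals check_bound
  -- divmod: Python raises ZeroDivisionError when num_recipients = 0; Pre_ excludes exactly those runs
  let qr := (PySem.Int.divmod? total_excess num_recipients).getD (0, 0)
  buildB check_bound qr.1 qr.2 vals 0

-- while True: … ; with fuel, as for A
def goB : Nat → List Int → Int → List Int
  | 0, vals, _ => vals
  | fuel+1, vals, check_bound =>
    let out := passB vals check_bound
    if out.any (fun v => decide (check_bound < v)) then goB fuel out check_bound else out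

def distribute_excess_alt (lst : List Int) (check_bound : Int) : List Int :=
  goB ((excB lst check_bound).toNat + 1) lst check_bound

-- ===== PRECONDITION & SPEC =====
-- Pre_ excludes exactly the inputs on which Python A raises ZeroDivisionError: A's repeated
-- redistribution reaches a state with no element below the bound (divmod by zero) iff either no
-- input element is below the bound or the list's sum exceeds length * bound.
def Pre_distribute_excess (lst : List Int) (check_bound : Int) : Prop :=
  (∃ v ∈ lst, v < check_bound) ∧ lst.sum ≤ (lst.length : Int) * check_bound
instance (lst : List Int) (check_bound : Int) : Decidable (Pre_distribute_excess lst check_bound) := by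
  unfold Pre_distribute_excess; infer_instance

def pvWitness_distribute_excess : List Int × Int := ([5, 0, 0], 3)

def Spec_distribute_excess (lst : List Int) (check_bound : Int) (out : List Int) : Prop := out = distribute_excess_alt lst check_bound
instance (lst : List Int) (check_bound : Int) (out : List Int) : Decidable (Spec_distribute_excess lst check_bound out) := by unfold Spec_distribute_excess; infer_instance

-- ===== CLAIM (what is proved, stated in full; the proofs are below) =====
def Claim_equal_distribute_excess : Prop := ∀ (lst : List Int) (check_bound : Int), Dom_distribute_excess lst check_bound → Pre_distribute_excess lst check_bound → Spec_distribute_excess lst check_bound (distribute_excess lst check_bound)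

-- ===== LEMMAS AND PROOFS =====

-- A's filter-map-sum equals B's running sum
lemma excB_acc (check_bound : Int) (lst : List Int) : ∀ s : Int,
    lst.foldl (fun s v => if check_bound < v then s + (v - check_bound) else s) s
      = s + excA lst check_bound := by
  induction lst with
  | nil => intro s; simp [excA]
  | cons v t ih =>
    intro s
    by_cases h : check_bound < v
    · rw [List.foldl_cons, if_pos h, ih]
      have hc : excA (v :: t) check_bound = (v - check_bound) + excA t check_bound := by
        simp [excA, h]
      rw [hc]; ring
    · rw [List.foldl_cons, if_neg h, ih]
      have hc : excA (v :: t) check_bound = excA t check_bound := by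
        simp [excA, h]
      rw [hc]

lemma exc_eq (lst : List Int) (check_bound : Int) :
    excA lst check_bound = excB lst check_bound := by
  simp [excB, excB_acc]

-- local (head-relative) recipient indices, as naturals
def ridx (check_bound : Int) : List Int → List Nat
  | [] => []
  | v :: t =>
    if v < check_bound then 0 :: (ridx check_bound t).map (· + 1)
    else (ridx check_bound t).map (· + 1)

lemma enumerate_shift (t : List Int) : ∀ s : Int,
    PySem.List.enumerate t (s + 1) = (PySem.List.enumerate t s).map (fun p => (p.1 + 1, p.2)) := by
  induction t with
  | nil => intro s; simp [PySem.List.enumerate_nil]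
  | cons v t ih =>
    intro s
    simp [PySem.List.enumerate_cons, ih]
    try ring

lemma recipsA_eq_ridx (check_bound : Int) (lst : List Int) :
    recipsA lst check_bound = (ridx check_bound lst).map (fun n : Nat => (n : Int)) := by
  induction lst with
  | nil => simp [recipsA, ridx, PySem.List.enumerate_nil]
  | cons v t ih =>
    have hsh : PySem.List.enumerate t 1
        = (PySem.List.enumerate t 0).map (fun p => (p.1 + 1, p.2)) := by
      simpa using enumerate_shift t 0
    have htail : ((PySem.List.enumerate t 0).filter (fun p => decide (p.2 < check_bound))).map
          (fun p => p.1 + 1)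
        = (ridx check_bound t).map (fun n : Nat => ((n : Int) + 1)) := by
      have h1 : (fun p : Int × Int => p.1 + 1) = (fun i : Int => i + 1) ∘ Prod.fst := rfl
      rw [h1, ← List.map_map]
      have h2 : ((PySem.List.enumerate t 0).filter (fun p => decide (p.2 < check_bound))).map
          Prod.fst = recipsA t check_bound := rfl
      rw [h2, ih, List.map_map]
      rfl
    by_cases h : v < check_bound <;>
      simp only [recipsA, ridx, PySem.List.enumerate_cons, zero_add, hsh, List.filter_cons,
        List.filter_map, List.map_cons, List.map_map, h, decide_true, decide_false, if_true,
        if_false, Function.comp_def] <;>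
      · rw [show (fun n : Nat => ((n + 1 : Nat) : Int)) = (fun n : Nat => ((n : Int) + 1)) from by
          funext n; push_cast; ring]
        simpa [Function.comp_def] using htail

lemma cntB_acc (check_bound : Int) (lst : List Int) : ∀ c : Int,
    lst.foldl (fun c v => if v < check_bound then c + 1 else c) c
      = c + ((ridx check_bound lst).length : Int) := by
  induction lst with
  | nil => intro c; simp [ridx]
  | cons v t ih =>
    intro c
    by_cases h : v < check_bound
    · simp only [List.foldl_cons, h, if_true, ih, ridx, List.length_cons, List.length_map]
      push_cast; ring
    · simp [List.foldl_cons, ridx, h, ih]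

lemma cnt_eq (lst : List Int) (check_bound : Int) :
    ((recipsA lst check_bound).length : Int) = cntB lst check_bound := by
  simp [cntB, cntB_acc, recipsA_eq_ridx]

-- folding index updates through a head via the (·+1)-shifted index list
lemma foldl_modify_shift (f : Int → Int) (S : List Nat) : ∀ (x : Int) (l : List Int),
    (S.map (· + 1)).foldl (fun l i => l.modify i f) (x :: l)
      = x :: S.foldl (fun l i => l.modify i f) l := by
  induction S with
  | nil => intro x l; simp
  | cons i S ih => intro x l; simp [List.foldl_cons, ih]

-- the pointwise meaning of one pass, counted by "how many recipients still get +1"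
def specGo (check_bound q : Int) : List Int → Nat → List Int
  | [], _ => []
  | v :: t, m =>
    if check_bound < v then check_bound :: specGo check_bound q t m
    else if v < check_bound then
      (v + q + (if 0 < m then 1 else 0)) :: specGo check_bound q t (m - 1)
    else v :: specGo check_bound q t m

lemma passA_core (check_bound q : Int) (lst : List Int) : ∀ m : Nat,
    ((ridx check_bound lst).take m).foldl (fun l i => l.modify i (· + 1))
      ((ridx check_bound lst).foldl (fun l i => l.modify i (· + q))
        (lst.map (fun val => if val ≤ check_bound then val else check_bound)))
      = specGo check_bound q lst m := by
  induction lst with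
  | nil => intro m; simp [ridx, specGo]
  | cons v t ih =>
    intro m
    by_cases hv : v < check_bound
    · have hle : v ≤ check_bound := le_of_lt hv
      have hnot : ¬ check_bound < v := not_lt.mpr hle
      cases m with
      | zero =>
        have h0 := ih 0
        simp only [List.take_zero, List.foldl_nil] at h0
        simp [ridx, hv, specGo, hnot, List.foldl_cons, foldl_modify_shift, h0]
      | succ k =>
        simp [ridx, hv, specGo, hnot, List.foldl_cons, List.take_succ_cons,
          ← List.map_take, foldl_modify_shift, ih k]
    · have hmap : (ridx check_bound (v :: t)) = (ridx check_bound t).map (· + 1) := by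
        simp [ridx, hv]
      by_cases hgt : check_bound < v
      · simp [hmap, specGo, hgt, not_le.mpr hgt, ← List.map_take, foldl_modify_shift, ih m]
      · have hle : v ≤ check_bound := not_lt.mp hgt
        simp [hmap, specGo, hgt, hv, hle, ← List.map_take, foldl_modify_shift, ih m]

lemma buildB_core (check_bound q rem : Int) (lst : List Int) : ∀ seen : Nat,
    buildB check_bound q rem lst seen = specGo check_bound q lst (rem.toNat - seen) := by
  induction lst with
  | nil => intro seen; simp [buildB, specGo]
  | cons v t ih =>
    intro seen
    by_cases hgt : check_bound < v
    · simp [buildB, specGo, hgt, ih]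
    · by_cases hv : v < check_bound
      · have hcond : (if ((seen : Nat) : Int) < rem then (1 : Int) else 0)
            = (if 0 < rem.toNat - seen then (1 : Int) else 0) := by
          by_cases h : ((seen : Nat) : Int) < rem
          · rw [if_pos h, if_pos (by omega)]
          · rw [if_neg h, if_neg (by omega)]
        have hdec : rem.toNat - (seen + 1) = rem.toNat - seen - 1 := by omega
        simp only [buildB, specGo, hgt, hv, if_true, if_false, ih, hdec]
        rw [hcond]
      · simp [buildB, specGo, hgt, hv, ih]

lemma pass_eq (lst : List Int) (check_bound : Int) :
    passA lst check_bound = passB lst check_bound := by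
  have hmapN : ∀ (g : Int → Int) (S : List Nat) (init : List Int),
      (S.map (fun n : Nat => (n : Int))).foldl (fun l idx => l.modify idx.toNat g) init
        = S.foldl (fun l i => l.modify i g) init := by
    intro g S
    induction S with
    | nil => intro init; simp
    | cons i S ih => intro init; simp [List.foldl_cons, ih]
  simp only [passA, passB]
  rw [← exc_eq, ← cnt_eq, recipsA_eq_ridx]
  generalize (PySem.Int.divmod? (excA lst check_bound)
      ((((ridx check_bound lst).map (fun n : Nat => (n : Int))).length : Nat) : Int)).getD (0, 0)
    = qr
  obtain ⟨q, rem⟩ := qr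
  simp only [← List.map_take, hmapN]
  rw [passA_core, buildB_core]
  simp

lemma go_eq (check_bound : Int) : ∀ (fuel : Nat) (lst : List Int),
    goA fuel lst check_bound = goB fuel lst check_bound := by
  intro fuel
  induction fuel with
  | zero => intro lst; simp [goA, goB]
  | succ f ih =>
    intro lst
    rw [show goA (f+1) lst check_bound
        = (if (passA lst check_bound).any (fun val => decide (check_bound < val)) then
            goA f (passA lst check_bound) check_bound else passA lst check_bound) from rfl]
    rw [show goB (f+1) lst check_bound
        = (if (passB lst check_bound).any (fun v => decide (check_bound < v)) then
            goB f (passB lst check_bound) check_bound else passB lst check_bound) from rfl]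
    rw [← pass_eq]
    by_cases hc : (passA lst check_bound).any (fun val => decide (check_bound < val))
    · simp only [if_pos hc]
      exact ih _
    · simp only [if_neg hc]

-- ===== VERDICT (by name: the statement is the Claim_ definition above) =====
theorem distribute_excess_spec : Claim_equal_distribute_excess := by
  intro lst check_bound _ _
  unfold Spec_distribute_excess distribute_excess distribute_excess_alt
  rw [← exc_eq, go_eq]
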